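-- pv_equiv track=rewrite | github.com/Tsavo-ka/Cryptography_Castle | Vigenere Cipher.py | key_build
-- ===== SOURCE A (Python) =====
-- def key_build(text, key):
--     '''
--     This function will stretch or compress the user's key to match the length of the text, accounting for special characters
--     '''
--     new = ""
--     ind = 0
--
--     while len(new) < len(text):
--
--         for c in text:
--
--             if not c.isalpha():
--                 new += c
--             else:
--                 new += key[ind].lower()
--                 if ind == len(key)-1:
--                     ind = 0
--                 else:
--                     ind += 1
--
--     return new
-- ===== SOURCE B (Python) =====
-- def key_build(text, key):
--     '''
--     This function will stretch or compress the user's key to match the length of the text, accounting for special characters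
--     '''
--     res = list(text)
--     positions = [i for i, c in enumerate(text) if c.isalpha()]
--     if positions:
--         reps = -(-len(positions) // len(key))
--         stream = (key.lower() * reps)[:len(positions)]
--         for pos, k in zip(positions, stream):
--             res[pos] = k
--     return "".join(res)
-- ===== Notes on version B (the rewrite author's own statement) =====
-- stated objective: alternative
-- what changed: A walks the text appending either the character or the next cyclically-indexed key letter to a growing string; B instead collects the letter positions, builds the whole key stream by string repetition plus a slice (ceil-division tiling), and writes it into a mutable list copy of the text by index assignment before joining.
import Mathlib
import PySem

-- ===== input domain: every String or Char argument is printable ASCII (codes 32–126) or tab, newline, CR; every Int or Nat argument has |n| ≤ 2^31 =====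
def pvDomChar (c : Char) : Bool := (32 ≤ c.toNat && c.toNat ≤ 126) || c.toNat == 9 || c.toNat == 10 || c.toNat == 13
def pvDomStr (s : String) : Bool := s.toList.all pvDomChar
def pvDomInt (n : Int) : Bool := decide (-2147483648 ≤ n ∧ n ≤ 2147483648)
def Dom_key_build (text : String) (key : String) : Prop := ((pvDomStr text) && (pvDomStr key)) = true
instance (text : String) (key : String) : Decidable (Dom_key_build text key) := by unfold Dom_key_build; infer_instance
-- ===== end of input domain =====

-- B replaces A's interleaved cyclic indexing by: collect the letter positions, tile the lowered key by
-- string repetition + slice, and write the stream into a mutable copy of the text by index assignment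
-- (alternative decomposition, same cost).

-- ===== PORT A =====
-- one step of A's inner `for c in text` loop; state = (new, ind)
def kbStepA (key : List Char) (st : List Char × Nat) (c : Char) : List Char × Nat :=
  if ¬ PySem.Chars.isalpha c then (st.1 ++ [c], st.2)
  else (st.1 ++ [PySem.Chars.lowerChar (PySem.List.pyGetD key (st.2 : Int) '?')],
        if st.2 = key.length - 1 then 0 else st.2 + 1)

-- the inner pass adds one character per text character (termination of the while loop)
theorem kbStepA_foldl_length (key text : List Char) (st : List Char × Nat) :
    (text.foldl (kbStepA key) st).1.length = st.1.length + text.length := by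
  induction text generalizing st with
  | nil => simp
  | cons c t ih =>
      simp only [List.foldl_cons, List.length_cons]
      rw [ih]
      unfold kbStepA
      split <;> simp <;> omega

-- A's inner `for c in text` pass as a whole
def kbPassA (key text : List Char) (new : List Char) (ind : Nat) : List Char × Nat :=
  text.foldl (kbStepA key) (new, ind)

-- A's `while len(new) < len(text)` loop
def kbWhileA (text key : List Char) (new : List Char) (ind : Nat) : List Char :=
  if _h : new.length < text.length then
    kbWhileA text key (kbPassA key text new ind).1 (kbPassA key text new ind).2
  else new
termination_by text.length - new.length
decreasing_by
  have := kbStepA_foldl_length key text (new, ind)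
  unfold kbPassA; omega

def key_build (text : String) (key : String) : String :=
  String.ofList (kbWhileA text.toList key.toList [] 0)

-- ===== PORT B =====
-- [i for i, c in enumerate(text) if c.isalpha()]
def kbPositions (xs : List Char) : List Int :=
  ((PySem.List.enumerate xs).filter (fun p => PySem.Chars.isalpha p.2)).map (fun p => p.1)

-- `for pos, k in zip(positions, stream): res[pos] = k`; positions are nonnegative in-range
-- indices here, so List.set at pos.toNat is exact Python item assignment
def kbSetAll (res : List Char) (ps : List (Int × Char)) : List Char :=
  ps.foldl (fun r pk => r.set pk.1.toNat pk.2) res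

def key_build_alt (text : String) (key : String) : String :=
  let res := text.toList
  let ps := kbPositions res
  if ps = [] then String.ofList res
  else
    let n : Int := (ps.length : Int)
    -- reps = -(-len(positions) // len(key))  (ceiling division, Python floor-div)
    let reps : Int := -(PySem.Int.floordiv (-n) ((key.toList.length : Int)))
    -- key.lower() * reps  is exactly `replicate reps copies joined` for reps ≥ 0, which holds here
    -- (ps ≠ []); the slice [:n] with 0 ≤ n is exactly `take`
    let stream := ((List.replicate reps.toNat (PySem.Chars.lower key.toList)).flatten).take n.toNat
    String.ofList (kbSetAll res (ps.zip stream))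

-- ===== PRECONDITION & SPEC =====
-- Pre_ excludes an empty key together with any alphabetic text character: there Python A raises
-- IndexError (and B raises ZeroDivisionError).
def Pre_key_build (text : String) (key : String) : Prop :=
  key.toList ≠ [] ∨ (∀ c ∈ text.toList, PySem.Chars.isalpha c = false)
instance (text : String) (key : String) : Decidable (Pre_key_build text key) := by
  unfold Pre_key_build; infer_instance

def pvWitness_key_build : String × String := ("Hello, World!", "KeY")

def Spec_key_build (text : String) (key : String) (out : String) : Prop := out = key_build_alt text key
instance (text : String) (key : String) (out : String) : Decidable (Spec_key_build text key out) := by unfold Spec_key_build; infer_instance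

-- ===== CLAIM (what is proved, stated in full; the proofs are below) =====
def Claim_equal_key_build : Prop := ∀ (text : String) (key : String), Dom_key_build text key → Pre_key_build text key → Spec_key_build text key (key_build text key)

-- ===== LEMMAS AND PROOFS =====

-- canonical middle form shared by both proofs: the key stream from index `ind` …
def kbStreamFrom (key : List Char) (ind : Nat) (nAlpha : Nat) : List Char :=
  (List.range nAlpha).map (fun i => PySem.Chars.lowerChar (key.getD ((ind + i) % key.length) '?'))

-- … merged with the text
def kbMerge : List Char → List Char → List Char
  | [], _ => []
  | c :: t, s =>
      if PySem.Chars.isalpha c then s.headD '?' :: kbMerge t s.tail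
      else c :: kbMerge t s

theorem kbStreamFrom_succ (key : List Char) (ind n : Nat) :
    kbStreamFrom key ind (n + 1) =
      PySem.Chars.lowerChar (key.getD (ind % key.length) '?') ::
        kbStreamFrom key ((ind + 1) % key.length) n := by
  unfold kbStreamFrom
  rw [List.range_succ_eq_map]
  simp only [List.map_cons, List.map_map, Nat.add_zero]
  congr 1
  apply List.map_congr_left
  intro i _
  simp only [Function.comp_apply]
  congr 2
  rw [Nat.mod_add_mod]
  congr 1
  omega

-- A's inner pass from state (acc, ind) equals acc ++ merge with the stream from ind
theorem kbFold_eq_merge (key : List Char) (hk : key ≠ []) :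
    ∀ (text acc : List Char) (ind : Nat), ind < key.length →
      (text.foldl (kbStepA key) (acc, ind)).1 =
        acc ++ kbMerge text (kbStreamFrom key ind (text.countP PySem.Chars.isalpha)) := by
  intro text
  induction text with
  | nil => intro acc ind _; simp [kbMerge]
  | cons c t ih =>
      intro acc ind hind
      have hlen : 0 < key.length := List.length_pos_iff.mpr hk
      by_cases hc : PySem.Chars.isalpha c
      · have hcount : (c :: t).countP PySem.Chars.isalpha = t.countP PySem.Chars.isalpha + 1 := by
          simp [hc]
        have hnext : (if ind = key.length - 1 then 0 else ind + 1) = (ind + 1) % key.length := by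
          by_cases h : ind = key.length - 1
          · subst h
            rw [if_pos rfl, Nat.sub_add_cancel hlen, Nat.mod_self]
          · rw [if_neg h, Nat.mod_eq_of_lt (by omega)]
        have hstep : kbStepA key (acc, ind) c =
            (acc ++ [PySem.Chars.lowerChar (key.getD ind '?')], (ind + 1) % key.length) := by
          rw [← hnext]
          simp [kbStepA, hc, PySem.List.pyGetD_natCast]
        rw [hcount, kbStreamFrom_succ, List.foldl_cons, hstep,
            ih _ _ (Nat.mod_lt _ hlen), Nat.mod_eq_of_lt hind]
        simp [kbMerge, hc, List.append_assoc]
      · have hcount : (c :: t).countP PySem.Chars.isalpha = t.countP PySem.Chars.isalpha := by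
          simp [hc]
        have hstep : kbStepA key (acc, ind) c = (acc ++ [c], ind) := by
          simp [kbStepA, hc]
        rw [hcount, List.foldl_cons, hstep, ih _ _ hind]
        simp [kbMerge, hc]

-- no alphabetic characters: A's inner pass copies the text
theorem kbFold_copy (key : List Char) :
    ∀ (text acc : List Char) (ind : Nat), (∀ c ∈ text, PySem.Chars.isalpha c = false) →
      (text.foldl (kbStepA key) (acc, ind)).1 = acc ++ text := by
  intro text
  induction text with
  | nil => intro acc ind _; simp
  | cons c t ih =>
      intro acc ind hall
      have hc : PySem.Chars.isalpha c = false := hall c (List.mem_cons_self)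
      have hstep : kbStepA key (acc, ind) c = (acc ++ [c], ind) := by
        simp [kbStepA, hc]
      rw [List.foldl_cons, hstep, ih (acc ++ [c]) ind
        (fun x hx => hall x (List.mem_cons_of_mem _ hx))]
      simp

-- unrolling A's while loop: it runs exactly one inner pass on nonempty text
theorem kbWhileA_eq (text key : List Char) :
    kbWhileA text key [] 0 = (text.foldl (kbStepA key) ([], 0)).1 := by
  cases ht : text with
  | nil =>
      rw [kbWhileA]
      simp
  | cons c t =>
      rw [← ht, kbWhileA]
      have hpos : ([] : List Char).length < text.length := by simp [ht]
      rw [dif_pos hpos, kbWhileA]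
      have hlen := kbStepA_foldl_length key text ([], 0)
      rw [dif_neg (by unfold kbPassA; simp at hlen ⊢; omega)]
      rfl

-- ---- B side ----

-- the position comprehension with a general enumerate start
def kbPosFrom (xs : List Char) (s : Int) : List Int :=
  ((PySem.List.enumerate xs s).filter (fun p => PySem.Chars.isalpha p.2)).map (fun p => p.1)

theorem kbPositions_eq (xs : List Char) : kbPositions xs = kbPosFrom xs 0 := rfl

theorem kbPosFrom_cons (c : Char) (t : List Char) (s : Int) :
    kbPosFrom (c :: t) s =
      if PySem.Chars.isalpha c then s :: kbPosFrom t (s + 1) else kbPosFrom t (s + 1) := by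
  simp only [kbPosFrom, PySem.List.enumerate_cons, List.filter_cons]
  by_cases hc : PySem.Chars.isalpha c <;> simp [hc]

theorem kbPosFrom_shift (t : List Char) : ∀ s : Int,
    kbPosFrom t (s + 1) = (kbPosFrom t s).map (· + 1) := by
  induction t with
  | nil => intro s; simp [kbPosFrom]
  | cons c t ih =>
      intro s
      rw [kbPosFrom_cons, kbPosFrom_cons]
      by_cases hc : PySem.Chars.isalpha c <;> simp [hc, ih]

theorem kbPosFrom_nonneg (t : List Char) : ∀ (s p : Int), p ∈ kbPosFrom t s → s ≤ p := by
  induction t with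
  | nil => intro s p h; simp [kbPosFrom] at h
  | cons c t ih =>
      intro s p h
      rw [kbPosFrom_cons] at h
      by_cases hc : PySem.Chars.isalpha c
      · rw [if_pos hc] at h
        rcases List.mem_cons.mp h with h | h
        · omega
        · have := ih (s + 1) p h; omega
      · rw [if_neg hc] at h
        have := ih (s + 1) p h; omega

theorem kbPosFrom_length (t : List Char) : ∀ s : Int,
    (kbPosFrom t s).length = t.countP PySem.Chars.isalpha := by
  induction t with
  | nil => intro s; simp [kbPosFrom]
  | cons c t ih =>
      intro s
      rw [kbPosFrom_cons]
      by_cases hc : PySem.Chars.isalpha c <;> simp [hc, ih]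

-- shifting every index by one and prepending a character commutes with the assignment fold
theorem kbSetAll_shift (l : List (Int × Char)) :
    ∀ (t : List Char) (c : Char), (∀ pk ∈ l, 0 ≤ pk.1) →
      kbSetAll (c :: t) (l.map (fun pk => (pk.1 + 1, pk.2))) = c :: kbSetAll t l := by
  induction l with
  | nil => intro t c _; simp [kbSetAll]
  | cons pk l ih =>
      intro t c hnn
      have hp : 0 ≤ pk.1 := hnn pk List.mem_cons_self
      have htn : (pk.1 + 1).toNat = pk.1.toNat + 1 := by omega
      simp only [kbSetAll, List.map_cons, List.foldl_cons]
      rw [htn, List.set_cons_succ]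
      exact ih (t.set pk.1.toNat pk.2) c (fun x hx => hnn x (List.mem_cons_of_mem _ hx))

-- the assignment fold over (positions, stream) is the merge
theorem kbSetAll_eq_merge (t : List Char) :
    ∀ s : List Char, s.length = t.countP PySem.Chars.isalpha →
      kbSetAll t ((kbPosFrom t 0).zip s) = kbMerge t s := by
  induction t with
  | nil => intro s _; simp [kbPosFrom, kbSetAll, kbMerge]
  | cons c t ih =>
      intro s hs
      have hshift : kbPosFrom t (0 + 1) = (kbPosFrom t 0).map (· + 1) := kbPosFrom_shift t 0
      have hnn : ∀ pk ∈ ((kbPosFrom t 0).zip s.tail), (0:Int) ≤ pk.1 := by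
        intro pk hpk
        exact kbPosFrom_nonneg t 0 pk.1 (List.of_mem_zip hpk).1
      by_cases hc : PySem.Chars.isalpha c
      · have hcount : (c :: t).countP PySem.Chars.isalpha = t.countP PySem.Chars.isalpha + 1 := by
          simp [hc]
        cases s with
        | nil => rw [hcount] at hs; simp at hs
        | cons k s' =>
            rw [hcount] at hs
            simp only [List.length_cons, Nat.add_right_cancel_iff] at hs
            rw [kbPosFrom_cons, if_pos hc, hshift]
            simp only [List.zip_cons_cons, List.zip_map_left]
            have hmap : List.map (Prod.map (· + 1) id) ((kbPosFrom t 0).zip s')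
                = List.map (fun pk => (pk.1 + 1, pk.2)) ((kbPosFrom t 0).zip s') := by
              simp [Prod.map]
            simp only [kbSetAll, List.foldl_cons, Int.toNat_zero, List.set_cons_zero]
            rw [show ∀ r l, List.foldl (fun (r : List Char) (pk : Int × Char) =>
                  r.set pk.1.toNat pk.2) r l = kbSetAll r l from fun _ _ => rfl]
            rw [hmap, kbSetAll_shift _ _ _ (by simpa using hnn), ih s' hs]
            simp [kbMerge, hc]
      · have hcount : (c :: t).countP PySem.Chars.isalpha = t.countP PySem.Chars.isalpha := by
          simp [hc]
        rw [hcount] at hs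
        rw [kbPosFrom_cons, if_neg hc, hshift, List.zip_map_left]
        have hmap : List.map (Prod.map (· + 1) id) ((kbPosFrom t 0).zip s)
            = List.map (fun pk => (pk.1 + 1, pk.2)) ((kbPosFrom t 0).zip s) := by
          simp [Prod.map]
        have hnn' : ∀ pk ∈ ((kbPosFrom t 0).zip s), (0:Int) ≤ pk.1 := by
          intro pk hpk
          exact kbPosFrom_nonneg t 0 pk.1 (List.of_mem_zip hpk).1
        rw [hmap, kbSetAll_shift _ _ _ hnn', ih s hs]
        simp [kbMerge, hc]

theorem kbFlatRep_length (L : List Char) (m : Nat) :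
    (List.replicate m L).flatten.length = m * L.length := by
  induction m with
  | zero => simp
  | succ m ih => simp [List.replicate_succ, ih]; ring

theorem kbFlatRep_getD (L : List Char) (hL : L ≠ []) (d : Char) :
    ∀ (m i : Nat), i < m * L.length →
      ((List.replicate m L).flatten).getD i d = L.getD (i % L.length) d := by
  have hlen : 0 < L.length := List.length_pos_iff.mpr hL
  intro m
  induction m with
  | zero => intro i h; omega
  | succ m ih =>
      intro i h
      simp only [List.replicate_succ, List.flatten_cons]
      by_cases hi : i < L.length
      · rw [List.getD_append _ _ _ _ hi, Nat.mod_eq_of_lt hi]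
      · have hle : L.length ≤ i := by omega
        have hmul : (m + 1) * L.length = m * L.length + L.length := by ring
        rw [List.getD_append_right _ _ _ _ hle, ih (i - L.length) (by omega)]
        congr 1
        rw [eq_comm]
        conv_lhs => rw [show i = (i - L.length) + L.length from by omega]
        rw [Nat.add_mod_right]

-- the tiled-and-sliced key equals the modular key stream
theorem kbStream_eq (key : List Char) (hk : key ≠ []) (m n : Nat) (h : n ≤ m * key.length) :
    ((List.replicate m (PySem.Chars.lower key)).flatten).take n = kbStreamFrom key 0 n := by
  have hlow : PySem.Chars.lower key = key.map PySem.Chars.lowerChar := by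
    simp [PySem.Chars.lower]
  have hlen : 0 < key.length := List.length_pos_iff.mpr hk
  have hflen : (List.replicate m (PySem.Chars.lower key)).flatten.length = m * key.length := by
    rw [hlow, kbFlatRep_length, List.length_map]
  apply List.ext_getElem
  · simp [hflen, kbStreamFrom, h]
  · intro i h1 h2
    have hi : i < n := by simpa [hflen, h] using h1
    have himod : i % key.length < key.length := Nat.mod_lt _ hlen
    rw [List.getElem_take]
    rw [← List.getD_eq_getElem _ '?' (by omega), hlow,
        kbFlatRep_getD _ (by simp [hk]) '?' m i (by simpa using (by omega : i < m * key.length)),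
        List.length_map]
    have : (key.map PySem.Chars.lowerChar).getD (i % key.length) '?'
        = PySem.Chars.lowerChar (key.getD (i % key.length) '?') := by
      rw [List.getD_eq_getElem _ _ (by simpa using himod), List.getElem_map,
          List.getD_eq_getElem _ _ himod]
    rw [this]
    simp [kbStreamFrom]

-- ===== VERDICT (by name: the statement is the Claim_ definition above) =====
theorem key_build_spec : Claim_equal_key_build := by
  intro text key _ hpre
  unfold Spec_key_build key_build key_build_alt
  rw [kbWhileA_eq]
  by_cases hp : kbPositions text.toList = []
  · -- no letters: both sides copy the text
    have hc0 : text.toList.countP PySem.Chars.isalpha = 0 := by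
      rw [← kbPosFrom_length text.toList 0, ← kbPositions_eq, hp]; rfl
    have hall : ∀ c ∈ text.toList, PySem.Chars.isalpha c = false := by
      intro c hc
      have := List.countP_eq_zero.mp hc0 c hc
      simpa using this
    rw [if_pos hp, kbFold_copy key.toList text.toList [] 0 hall]
    simp
  · rw [if_neg hp]
    -- some letter exists, so Pre_ gives a nonempty key
    have hcpos : 0 < text.toList.countP PySem.Chars.isalpha := by
      rw [← kbPosFrom_length text.toList 0, ← kbPositions_eq]
      exact List.length_pos_iff.mpr hp
    have hk : key.toList ≠ [] := by
      rcases hpre with hk | hna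
      · exact hk
      · exfalso
        rcases List.countP_pos_iff.mp hcpos with ⟨c, hc, hca⟩
        rw [hna c hc] at hca; exact absurd hca (by simp)
    have hklen : 0 < key.toList.length := List.length_pos_iff.mpr hk
    set n : Nat := (kbPositions text.toList).length with hn
    have hnc : n = text.toList.countP PySem.Chars.isalpha := by
      rw [hn, kbPositions_eq, kbPosFrom_length]
    -- ceiling division: reps * len ≥ n
    set q : Int := PySem.Int.floordiv (-(n : Int)) ((key.toList.length : Int)) with hq
    have hmod := PySem.Int.floordiv_mul_add_mod (-(n : Int)) ((key.toList.length : Int))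
    rw [← hq] at hmod
    have hr0 : 0 ≤ PySem.Int.mod (-(n : Int)) ((key.toList.length : Int)) :=
      PySem.Int.mod_nonneg _ (by exact_mod_cast hklen)
    have hqneg : q ≤ 0 := by
      by_contra hqpos
      have hqpos : 1 ≤ q := by omega
      have h1 : (1 : Int) * (key.toList.length : Int) ≤ q * (key.toList.length : Int) :=
        mul_le_mul_of_nonneg_right (by omega) (by exact_mod_cast Nat.zero_le _)
      rw [one_mul] at h1
      omega
    have hbound : (n : Int) ≤ (-q).toNat * (key.toList.length : Int) := by
      have h2 : ((-q).toNat : Int) = -q := Int.toNat_of_nonneg (by omega)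
      have h3 : -q * (key.toList.length : Int) = -(q * (key.toList.length : Int)) := by ring
      rw [h2, h3]
      omega
    have hbound' : n ≤ (-q).toNat * key.toList.length := by exact_mod_cast hbound
    dsimp only
    rw [show ((kbPositions text.toList).length : Int).toNat = n by simp [hn]]
    rw [show (-(PySem.Int.floordiv (-((kbPositions text.toList).length : Int))
          ((key.toList.length : Int)))).toNat = (-q).toNat by rw [hq]]
    rw [kbStream_eq key.toList hk _ n hbound', kbPositions_eq,
        kbSetAll_eq_merge text.toList (kbStreamFrom key.toList 0 n)
          (by simp [kbStreamFrom, hnc])]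
    rw [kbFold_eq_merge key.toList hk text.toList [] 0 hklen]
    simp [hnc]
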